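-- pv_equiv track=rewrite | github.com/mmuramatsu/coding-challenges | LeetCode/Hard/2163-Minimum_Difference_In_Sums_After_Removal_Of_Elements/2163-MinimumDifferenceInSumsAfterRemovalOfElements.py | minimumDifference2
-- ===== SOURCE A (Python) =====
-- import heapq
--
-- def minimumDifference2(nums: list[int]) -> int:
--     n3 = len(nums)
--     n = n3 // 3
--
--     heap = [-x for x in nums[:n]]
--     heapq.heapify(heap)
--     sum_elements = sum(heap) * -1
--     prefix_sum = [0] * (n3 + 1)
--     prefix_sum[0] = sum_elements
--
--     for i in range(n, 2 * n):
--         heapq.heappush(heap, -nums[i])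
--         sum_elements += nums[i]
--
--         sum_elements -= -heapq.heappop(heap)
--         prefix_sum[i - (n - 1)] = sum_elements
--
--     heap = [x for x in nums[2 * n : n3]]
--     heapq.heapify(heap)
--     sum_elements = sum(heap)
--     ans = prefix_sum[n] - sum_elements
--
--     for i in range(2 * n - 1, n - 1, -1):
--         heapq.heappush(heap, nums[i])
--         sum_elements += nums[i]
--
--         sum_elements -= heapq.heappop(heap)
--         ans = min(ans, prefix_sum[i - n] - sum_elements)
--
--     return ans
-- ===== SOURCE B (Python) =====
-- def minimumDifference2(nums: list[int]) -> int:
--     n3 = len(nums)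
--     n = n3 // 3
--     m = n3 - 2 * n
--     cands = []
--     for i in range(n, 2 * n + 1):
--         pre = sum(sorted(nums[:i])[:n])
--         suf = sum(sorted(nums[i:], reverse=True)[:m])
--         cands.append(pre - suf)
--     return min(cands)
-- ===== Notes on version B (the rewrite author's own statement) =====
-- stated objective: simpler
-- what changed: Replaces the two heap-maintenance loops and the in-place prefix_sum table by a direct per-split computation: for each split point i it takes the n smallest of nums[:i] and the (len-2n) largest of nums[i:] via sorting, and returns the minimum candidate.
import Mathlib
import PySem

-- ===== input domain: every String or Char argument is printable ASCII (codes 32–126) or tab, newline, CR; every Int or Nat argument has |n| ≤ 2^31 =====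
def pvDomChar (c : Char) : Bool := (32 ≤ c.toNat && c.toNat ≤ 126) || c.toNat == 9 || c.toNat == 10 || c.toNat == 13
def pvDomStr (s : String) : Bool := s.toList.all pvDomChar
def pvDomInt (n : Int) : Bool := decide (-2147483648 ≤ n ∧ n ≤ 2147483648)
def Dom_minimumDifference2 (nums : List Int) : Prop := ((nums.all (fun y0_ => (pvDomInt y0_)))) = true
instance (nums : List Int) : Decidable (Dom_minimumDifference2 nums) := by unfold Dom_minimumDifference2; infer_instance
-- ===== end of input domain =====

-- B replaces A's two heap-maintenance loops and in-place prefix table by a direct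
-- per-split-point computation over sorted slices (simpler, not faster).


-- ===== PORT A =====
-- heapq is not in PySem; the heap is modelled as a plain list holding the heap's
-- multiset of elements: heapq.heappush = append, heapq.heappop = remove one
-- occurrence of the minimum.  A observes the heap ONLY through sum(heap) and the
-- values returned by heappop, and both are functions of the multiset alone, so
-- this model is exact for A.
def popMinA (h : List Int) : Int × List Int :=
  -- heappop; h is never empty when A pops (heap size is n ≥ 1 resp. m ≥ 1 there),
  -- so the 0 default is unreachable
  match PySem.List.min? h (fun x => x) with
  | some m => (m, h.erase m)
  | none => (0, h)

-- body of A's first loop (push -nums[i]; sum += nums[i]; pop; record prefix sum)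
def stepA1 (nums : List Int) (n : Int) : List Int × Int × List Int → Int → List Int × Int × List Int :=
  fun st i =>
    let heap := st.1 ++ [-(PySem.List.pyGetD nums i 0)]
    let s := st.2.1 + PySem.List.pyGetD nums i 0
    let pm := popMinA heap
    let s2 := s - (-(pm.1))
    (pm.2, s2, PySem.List.pySetD st.2.2 (i - (n - 1)) s2)

-- body of A's second loop (push nums[i]; sum += nums[i]; pop; ans = min(ans, …))
def stepA2 (nums ps : List Int) (n : Int) : List Int × Int × Int → Int → List Int × Int × Int :=
  fun st i =>
    let heap := st.1 ++ [PySem.List.pyGetD nums i 0]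
    let s := st.2.1 + PySem.List.pyGetD nums i 0
    let pm := popMinA heap
    let s2 := s - pm.1
    (pm.2, s2, min st.2.2 (PySem.List.pyGetD ps (i - n) 0 - s2))

def minimumDifference2 (nums : List Int) : Int :=
  let n3 : Int := (nums.length : Int)
  let n : Int := PySem.Int.floordiv n3 3
  let heap0 : List Int := (PySem.List.slice nums none (some n)).map (fun x => -x)
  let sum0 : Int := heap0.sum * (-1)
  let ps0 : List Int := PySem.List.pySetD (List.replicate (nums.length + 1) (0 : Int)) 0 sum0
  let st1 := (PySem.List.pyRange n (2*n) 1).foldl (stepA1 nums n) (heap0, sum0, ps0)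
  let ps := st1.2.2
  let heap1 : List Int := PySem.List.slice nums (some (2*n)) (some n3)
  let sum1 : Int := heap1.sum
  let ans0 : Int := PySem.List.pyGetD ps n 0 - sum1
  let st2 := (PySem.List.pyRange (2*n - 1) (n - 1) (-1)).foldl (stepA2 nums ps n) (heap1, sum1, ans0)
  st2.2.2

-- ===== PORT B =====
def minimumDifference2_alt (nums : List Int) : Int :=
  let n3 : Int := (nums.length : Int)
  let n : Int := PySem.Int.floordiv n3 3
  let m : Int := n3 - 2*n
  let cands : List Int := (PySem.List.pyRange n (2*n + 1) 1).map (fun i =>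
    (PySem.List.slice (PySem.List.sorted (PySem.List.slice nums none (some i)) (fun x => x) false) none (some n)).sum
    - (PySem.List.slice (PySem.List.sorted (PySem.List.slice nums (some i) none) (fun x => x) true) none (some m)).sum)
  -- min(cands); cands is nonempty (the range always contains n), the 0 default is unreachable
  (PySem.List.min? cands (fun x => x)).getD 0

-- ===== PRECONDITION & SPEC =====
def Spec_minimumDifference2 (nums : List Int) (out : Int) : Prop := out = minimumDifference2_alt nums
instance (nums : List Int) (out : Int) : Decidable (Spec_minimumDifference2 nums out) := by unfold Spec_minimumDifference2; infer_instance

-- ===== CLAIM (what is proved, stated in full; the proofs are below) =====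
def Claim_equal_minimumDifference2 : Prop := ∀ (nums : List Int), Dom_minimumDifference2 nums → Spec_minimumDifference2 nums (minimumDifference2 nums)

-- ===== LEMMAS AND PROOFS =====
def sA (S : List Int) : List Int := PySem.List.sorted S (fun x => x) false
def sD (S : List Int) : List Int := PySem.List.sorted S (fun x => x) true

theorem sA_perm (S : List Int) : (sA S).Perm S := PySem.List.sorted_perm ..
theorem sD_perm (S : List Int) : (sD S).Perm S := PySem.List.sorted_perm ..

theorem sA_pw (S : List Int) : (sA S).Pairwise (· ≤ ·) := PySem.List.sorted_pairwise S (fun x => x)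
theorem sD_pw (S : List Int) : (sD S).Pairwise (fun a b => b ≤ a) := PySem.List.sorted_pairwise_rev S (fun x => x)

theorem sA_eq (L S : List Int) (h1 : L.Perm S) (h2 : L.Pairwise (· ≤ ·)) : sA S = L := by
  unfold sA; exact PySem.List.sorted_id_eq_of_perm_of_pairwise S L h1 h2

theorem sD_eq (L S : List Int) (h1 : L.Perm S) (h2 : L.Pairwise (fun a b => b ≤ a)) : sD S = L := by
  unfold sD
  apply PySem.List.eq_of_perm_of_pairwise_le_of_injective (key := fun x => -x)
    (fun a b hab => by simpa using hab)
  · exact ((sD_perm S).trans h1.symm)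
  · exact (sD_pw S).imp (fun h => by simpa using h)
  · exact h2.imp (fun h => by simpa using h)

theorem char_low (C R S : List Int) (h : (C ++ R).Perm S) (hcr : ∀ c ∈ C, ∀ r ∈ R, c ≤ r) :
    (sA S).take C.length = sA C := by
  have hsplit : sA S = sA C ++ sA R := by
    apply sA_eq
    · exact ((sA_perm C).append (sA_perm R)).trans h
    · refine List.pairwise_append.mpr ⟨sA_pw C, sA_pw R, ?_⟩
      intro c hc r hr
      exact hcr c ((sA_perm C).mem_iff.mp hc) r ((sA_perm R).mem_iff.mp hr)
  rw [hsplit]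
  have : C.length = (sA C).length := ((sA_perm C).length_eq).symm
  rw [this, List.take_left]

theorem char_high (C R S : List Int) (h : (C ++ R).Perm S) (hcr : ∀ c ∈ C, ∀ r ∈ R, r ≤ c) :
    (sD S).take C.length = sD C := by
  have hsplit : sD S = sD C ++ sD R := by
    apply sD_eq
    · exact ((sD_perm C).append (sD_perm R)).trans h
    · refine List.pairwise_append.mpr ⟨sD_pw C, sD_pw R, ?_⟩
      intro c hc r hr
      exact hcr c ((sD_perm C).mem_iff.mp hc) r ((sD_perm R).mem_iff.mp hr)
  rw [hsplit]
  have : C.length = (sD C).length := ((sD_perm C).length_eq).symm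
  rw [this, List.take_left]


theorem perm_push_pop (T R S : List Int) (x M : Int) (hM : M ∈ T ++ [x]) (hTR : (T ++ R).Perm S) :
    ((((T ++ [x]).erase M) ++ (R ++ [M])).Perm (S ++ [x])) := by
  have h1 : ((T ++ [x]).erase M ++ [M]).Perm (T ++ [x]) :=
    (List.perm_append_singleton ..).trans (List.perm_cons_erase hM).symm
  have p1 : ((T ++ [x]).erase M ++ (R ++ [M])).Perm (((T ++ [x]).erase M ++ [M]) ++ R) :=
    (List.Perm.append_left _ List.perm_append_comm).trans (by rw [List.append_assoc])
  have p2 : (((T ++ [x]).erase M ++ [M]) ++ R).Perm ((T ++ [x]) ++ R) := h1.append_right R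
  have p3 : ((T ++ [x]) ++ R).Perm ((T ++ R) ++ [x]) := by
    rw [List.append_assoc, List.append_assoc]
    exact List.Perm.append_left _ List.perm_append_comm
  exact ((p1.trans p2).trans p3).trans (hTR.append_right [x])

-- the kept elements stay below the discarded ones after push x / pop a maximal M
theorem cross_push_pop_low (T R : List Int) (x M : Int)
    (hcr : ∀ c ∈ T, ∀ r ∈ R, c ≤ r)
    (hM : M ∈ T ++ [x]) (hmax : ∀ y ∈ T ++ [x], y ≤ M) :
    ∀ c ∈ (T ++ [x]).erase M, ∀ r ∈ R ++ [M], c ≤ r := by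
  intro c hc r hr
  have hcK : c ∈ T ++ [x] := List.mem_of_mem_erase hc
  rcases List.mem_append.mp hr with hrR | hrM
  · rcases List.mem_append.mp hcK with hcT | hcx
    · exact hcr c hcT r hrR
    · have hcx : c = x := List.mem_singleton.mp hcx
      by_cases hxT : x ∈ T
      · exact hcr c (hcx ▸ hxT) r hrR
      · by_cases hMx : M = x
        · exfalso
          have : (T ++ [x]).erase M = T := by
            rw [hMx, List.erase_append_right _ hxT]; simp
          rw [this] at hc
          exact hxT (hcx ▸ hc)
        · have hMT : M ∈ T := by
            rcases List.mem_append.mp hM with h | h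
            · exact h
            · exact absurd (List.mem_singleton.mp h) hMx
          exact le_trans (hmax c hcK) (hcr M hMT r hrR)
  · have : r = M := List.mem_singleton.mp hrM
    exact this ▸ hmax c hcK

theorem cross_push_pop_high (T R : List Int) (x M : Int)
    (hcr : ∀ c ∈ T, ∀ r ∈ R, r ≤ c)
    (hM : M ∈ T ++ [x]) (hmin : ∀ y ∈ T ++ [x], M ≤ y) :
    ∀ c ∈ (T ++ [x]).erase M, ∀ r ∈ R ++ [M], r ≤ c := by
  intro c hc r hr
  have hcK : c ∈ T ++ [x] := List.mem_of_mem_erase hc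
  rcases List.mem_append.mp hr with hrR | hrM
  · rcases List.mem_append.mp hcK with hcT | hcx
    · exact hcr c hcT r hrR
    · have hcx : c = x := List.mem_singleton.mp hcx
      by_cases hxT : x ∈ T
      · exact hcr c (hcx ▸ hxT) r hrR
      · by_cases hMx : M = x
        · exfalso
          have : (T ++ [x]).erase M = T := by
            rw [hMx, List.erase_append_right _ hxT]; simp
          rw [this] at hc
          exact hxT (hcx ▸ hc)
        · have hMT : M ∈ T := by
            rcases List.mem_append.mp hM with h | h
            · exact h
            · exact absurd (List.mem_singleton.mp h) hMx
          exact le_trans (hcr M hMT r hrR) (hmin c hcK)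
  · have : r = M := List.mem_singleton.mp hrM
    exact this ▸ hmin c hcK

theorem foldl_min_mem_cons (a : Int) (l : List Int) : List.foldl min a l ∈ a :: l := by
  rcases PySem.List.foldl_min_mem l a with h | h
  · rw [h]; exact List.mem_cons_self ..
  · exact List.mem_cons_of_mem _ h

theorem foldl_min_le_cons (a : Int) (l : List Int) : ∀ y ∈ a :: l, List.foldl min a l ≤ y := by
  intro y hy
  rcases List.mem_cons.mp hy with rfl | hy
  · exact (PySem.List.foldl_min_le l y).1
  · exact (PySem.List.foldl_min_le l a).2 y hy

theorem foldl_min_eq_of_perm (a b : Int) (l l' : List Int) (h : (a :: l).Perm (b :: l')) :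
    List.foldl min a l = List.foldl min b l' := by
  apply le_antisymm
  · exact foldl_min_le_cons a l _ (h.symm.mem_iff.mp (foldl_min_mem_cons b l'))
  · exact foldl_min_le_cons b l' _ (h.mem_iff.mp (foldl_min_mem_cons a l))

theorem popMinA_spec (h : List Int) (hne : h ≠ []) :
    (popMinA h).1 ∈ h ∧ (∀ y ∈ h, (popMinA h).1 ≤ y) ∧ (popMinA h).2 = h.erase (popMinA h).1 := by
  unfold popMinA
  rcases hm : PySem.List.min? h (fun x => x) with _ | m
  · exact absurd ((PySem.List.min?_eq_none_iff h _).mp hm) hne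
  · exact ⟨PySem.List.min?_mem hm, fun y hy => PySem.List.min?_isMin hm y hy, rfl⟩

def lowS (n : Nat) (S : List Int) : Int := ((sA S).take n).sum
def highS (m : Nat) (S : List Int) : Int := ((sD S).take m).sum


-- the n smallest of S, extended by one element: what A's push/pop step keeps
theorem low_step (S : List Int) (x : Int) (nn : Nat) (hn : nn ≤ S.length)
    (heap : List Int) (hperm : heap.Perm (((sA S).take nn).map (fun y => -y))) :
    let hp := heap ++ [-x]
    let pm := popMinA hp
    pm.2.Perm (((sA (S ++ [x])).take nn).map (fun y => -y)) ∧
    -(pm.1) ∈ (sA S).take nn ++ [x] ∧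
    lowS nn (S ++ [x]) = lowS nn S + x - (-(pm.1)) := by
  intro hp pm
  have hpne : hp ≠ [] := by simp [hp]
  obtain ⟨hmem, hmin, herase⟩ := popMinA_spec hp hpne
  set T := (sA S).take nn with hT
  set R := (sA S).drop nn with hR
  have hTlen : T.length = nn := by
    simp [hT, List.length_take, (sA_perm S).length_eq, hn]
  have hhp : hp.Perm ((T ++ [x]).map (fun y => -y)) := by
    simpa [hp] using hperm.append_right [-x]
  -- the popped element is the negation of a maximal element M of T ++ [x]
  have hmemmap : pm.1 ∈ (T ++ [x]).map (fun y => -y) := hhp.mem_iff.mp hmem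
  obtain ⟨M, hMmem, hMeq⟩ := List.mem_map.mp hmemmap
  have hM1 : -(pm.1) = M := by omega
  have hmax : ∀ y ∈ T ++ [x], y ≤ M := by
    intro y hy
    have : pm.1 ≤ -y := hmin _ (hhp.symm.mem_iff.mp (List.mem_map_of_mem hy))
    omega
  have hTR : (T ++ R).Perm S := by rw [hT, hR, List.take_append_drop]; exact sA_perm S
  have hcr : ∀ c ∈ T, ∀ r ∈ R, c ≤ r := by
    have := sA_pw S
    rw [← List.take_append_drop nn (sA S)] at this
    exact fun c hc r hr => (List.pairwise_append.mp this).2.2 c hc r hr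
  have hperm' := perm_push_pop T R S x M hMmem hTR
  have hcross' := cross_push_pop_low T R x M hcr hMmem hmax
  set C := (T ++ [x]).erase M with hC
  have hClen : C.length = nn := by
    rw [hC, List.length_erase_of_mem hMmem]; simp [hTlen]
  have hchar : (sA (S ++ [x])).take nn = sA C := by
    have := char_low C (R ++ [M]) (S ++ [x]) hperm' hcross'
    rwa [hClen] at this
  refine ⟨?_, hM1 ▸ hMmem, ?_⟩
  · -- remaining heap
    have h1 : pm.2.Perm (((T ++ [x]).map (fun y => -y)).erase pm.1) := by
      rw [herase]; exact hhp.erase pm.1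
    have hinj : Function.Injective (fun y : Int => -y) := fun a b hab => by
      simpa using hab
    have h2 : ((T ++ [x]).map (fun y => -y)).erase pm.1 = C.map (fun y => -y) := by
      rw [hC, List.map_erase hinj]
      show _ = (List.map (fun y => -y) (T ++ [x])).erase (-M)
      rw [hMeq]
    rw [hchar]
    exact ((h1.trans (h2 ▸ List.Perm.refl _)).trans ((sA_perm C).symm.map _))
  · -- the sum
    have hsum1 : (T ++ [x]).sum = M + C.sum := ((List.perm_cons_erase hMmem).sum_eq).trans (by simp [hC])
    have hsum2 : lowS nn (S ++ [x]) = C.sum := by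
      rw [lowS, hchar]; exact (sA_perm C).sum_eq
    have : lowS nn S = T.sum := rfl
    rw [hsum2, this, hM1]
    have : (T ++ [x]).sum = T.sum + x := by simp
    omega

-- the m largest of S, extended by one element at the front: A's suffix push/pop step
theorem high_step (S : List Int) (x : Int) (mm : Nat) (hm : mm ≤ S.length)
    (heap : List Int) (hperm : heap.Perm ((sD S).take mm)) :
    let hp := heap ++ [x]
    let pm := popMinA hp
    pm.2.Perm ((sD (x :: S)).take mm) ∧
    highS mm (x :: S) = highS mm S + x - pm.1 := by
  intro hp pm
  have hpne : hp ≠ [] := by simp [hp]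
  obtain ⟨hmem, hmin, herase⟩ := popMinA_spec hp hpne
  set T := (sD S).take mm with hT
  set R := (sD S).drop mm with hR
  have hTlen : T.length = mm := by
    simp [hT, List.length_take, (sD_perm S).length_eq, hm]
  have hhp : hp.Perm (T ++ [x]) := hperm.append_right [x]
  have hMmem : pm.1 ∈ T ++ [x] := hhp.mem_iff.mp hmem
  have hminT : ∀ y ∈ T ++ [x], pm.1 ≤ y := fun y hy => hmin y (hhp.symm.mem_iff.mp hy)
  have hTR : (T ++ R).Perm S := by rw [hT, hR, List.take_append_drop]; exact sD_perm S
  have hcr : ∀ c ∈ T, ∀ r ∈ R, r ≤ c := by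
    have := sD_pw S
    rw [← List.take_append_drop mm (sD S)] at this
    exact fun c hc r hr => (List.pairwise_append.mp this).2.2 c hc r hr
  have hperm' : (((T ++ [x]).erase pm.1) ++ (R ++ [pm.1])).Perm (x :: S) :=
    (perm_push_pop T R S x pm.1 hMmem hTR).trans (List.perm_append_singleton ..)
  have hcross' := cross_push_pop_high T R x pm.1 hcr hMmem hminT
  set C := (T ++ [x]).erase pm.1 with hC
  have hClen : C.length = mm := by
    rw [hC, List.length_erase_of_mem hMmem]; simp [hTlen]
  have hchar : (sD (x :: S)).take mm = sD C := by
    have := char_high C (R ++ [pm.1]) (x :: S) hperm' hcross'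
    rwa [hClen] at this
  constructor
  · have h1 : pm.2.Perm ((T ++ [x]).erase pm.1) := by
      rw [herase]; exact hhp.erase pm.1
    rw [hchar]
    exact h1.trans ((sD_perm C).symm)
  · have hsum1 : (T ++ [x]).sum = pm.1 + C.sum := ((List.perm_cons_erase hMmem).sum_eq).trans (by simp [hC])
    have hsum2 : highS mm (x :: S) = C.sum := by
      rw [highS, hchar]; exact (sD_perm C).sum_eq
    have hS : highS mm S = T.sum := rfl
    have hTx : (T ++ [x]).sum = T.sum + x := by simp
    rw [hsum2, hS]
    omega

def Inv1 (nums : List Int) (k : Nat) (r : List Int × Int × List Int) : Prop :=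
  r.1.Perm (((sA (nums.take (nums.length/3 + k))).take (nums.length/3)).map (fun y => -y)) ∧
  r.2.1 = lowS (nums.length/3) (nums.take (nums.length/3 + k)) ∧
  r.2.2.length = nums.length + 1 ∧
  ∀ j : Nat, j ≤ k → r.2.2.getD j 0 = lowS (nums.length/3) (nums.take (nums.length/3 + j))

theorem loop1 (nums : List Int) (k : Nat) (hk : k ≤ nums.length / 3) :
    Inv1 nums k
      ((PySem.List.pyRange ((nums.length/3 : Nat) : Int) (((nums.length/3 : Nat) : Int) + (k : Int)) 1).foldl
        (stepA1 nums ((nums.length/3 : Nat) : Int))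
        ((nums.take (nums.length/3)).map (fun y => -y),
         ((nums.take (nums.length/3)).map (fun y => -y)).sum * (-1),
         PySem.List.pySetD (List.replicate (nums.length + 1) (0:Int)) 0
           (((nums.take (nums.length/3)).map (fun y => -y)).sum * (-1)))) := by
  have h3 : nums.length / 3 * 3 ≤ nums.length := Nat.div_mul_le_self nums.length 3
  set nn := nums.length / 3 with hnn
  induction k with
  | zero =>
    unfold Inv1
    rw [show ((nn : Int) + ((0:Nat) : Int)) = (nn:Int) by simp, PySem.List.pyRange_one_eq_nil (le_refl _)]
    simp only [List.foldl_nil, Nat.add_zero, ← hnn]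
    have htk : (nums.take nn).length = nn := by
      rw [List.length_take]; omega
    have hself : (sA (nums.take nn)).take nn = sA (nums.take nn) := by
      apply List.take_of_length_le
      rw [(sA_perm _).length_eq, htk]
    have hsum : ((nums.take nn).map (fun y => -y)).sum * (-1) = (sA (nums.take nn)).sum := by
      rw [(sA_perm _).sum_eq]
      have : ((nums.take nn).map (fun y => -y)).sum = -((nums.take nn).sum) :=
        (List.sum_neg (nums.take nn)).symm
      rw [this]; ring
    refine ⟨?_, ?_, ?_, ?_⟩
    · rw [hself]
      exact ((sA_perm (nums.take nn)).symm).map _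
    · rw [lowS, hself, ← hsum]
    · rw [show (0:Int) = ((0:Nat):Int) from rfl, PySem.List.pySetD_natCast]
      simp
    · intro j hj
      interval_cases j
      simp only [Nat.add_zero]
      rw [lowS, hself, show (0:Int) = ((0:Nat):Int) from rfl, PySem.List.pySetD_natCast]
      rw [List.getD_eq_getElem?_getD, List.getElem?_set_self (by simp), Option.getD_some, hsum]
  | succ k ih =>
    have hk' : k ≤ nn := by omega
    have hnn1 : 1 ≤ nn := by omega
    have hidx : nn + k < nums.length := by omega
    have hsplit : PySem.List.pyRange (nn : Int) ((nn : Int) + ((k+1 : Nat) : Int)) 1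
        = PySem.List.pyRange (nn : Int) ((nn : Int) + (k : Int)) 1 ++ [(nn : Int) + (k : Int)] := by
      rw [show ((nn : Int) + ((k+1 : Nat) : Int)) = ((nn : Int) + (k : Int)) + 1 by push_cast; ring]
      exact PySem.List.pyRange_one_succ_right (by omega)
    rw [hsplit, List.foldl_append]
    obtain ⟨ih1, ih2, ih3, ih4⟩ := ih hk'
    set r := (PySem.List.pyRange (nn : Int) ((nn : Int) + (k : Int)) 1).foldl
        (stepA1 nums ((nn : Nat) : Int))
        ((nums.take nn).map (fun y => -y),
         ((nums.take nn).map (fun y => -y)).sum * (-1),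
         PySem.List.pySetD (List.replicate (nums.length + 1) (0:Int)) 0
           (((nums.take nn).map (fun y => -y)).sum * (-1))) with hr
    have hx : PySem.List.pyGetD nums ((nn : Int) + (k : Int)) 0 = nums[nn + k] := by
      rw [show ((nn : Int) + (k : Int)) = ((nn + k : Nat) : Int) by push_cast; ring]
      rw [PySem.List.pyGetD_natCast]
      exact List.getD_eq_getElem nums 0 hidx
    have htake : nums.take (nn + (k+1)) = nums.take (nn + k) ++ [nums[nn + k]] := by
      rw [show nn + (k+1) = (nn + k) + 1 by omega, List.take_add_one, List.getElem?_eq_getElem hidx]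
      rfl
    have hlen : nn ≤ (nums.take (nn + k)).length := by
      rw [List.length_take]; omega
    have hstep := low_step (nums.take (nn + k)) (nums[nn + k]) nn hlen r.1 ih1
    simp only [] at hstep
    obtain ⟨hs1, hs2, hs3⟩ := hstep
    unfold Inv1
    simp only [List.foldl_cons, List.foldl_nil, stepA1, hx, ← hnn]
    refine ⟨?_, ?_, ?_, ?_⟩
    · rw [htake]
      exact hs1
    · rw [htake, hs3, ih2]
    · rw [PySem.List.pySetD_of_nonneg _ _ (by omega), List.length_set]
      exact ih3
    · intro j hj
      have hixcast : ((nn : Int) + (k : Int) - ((nn : Int) - 1)) = ((k+1 : Nat) : Int) := by push_cast; ring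
      rw [hixcast, PySem.List.pySetD_natCast]
      by_cases hjk : j = k + 1
      · subst hjk
        rw [List.getD_eq_getElem?_getD, List.getElem?_set_self (by rw [ih3]; omega), Option.getD_some]
        rw [htake, hs3, ih2]
      · rw [List.getD_eq_getElem?_getD, List.getElem?_set_ne (by omega)]
        rw [← List.getD_eq_getElem?_getD]
        exact ih4 j (by omega)


-- the value compared at split point i: best prefix sum minus best suffix sum
def gval (nums : List Int) (i : Nat) : Int :=
  lowS (nums.length/3) (nums.take i) - highS (nums.length - 2*(nums.length/3)) (nums.drop i)

theorem loop2 (nums ps : List Int)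
    (hps : ∀ j : Nat, j ≤ nums.length/3 →
      ps.getD j 0 = lowS (nums.length/3) (nums.take (nums.length/3 + j)))
    (k : Nat) : k ≤ nums.length/3 → ∀ heap s a,
    heap.Perm ((sD (nums.drop (nums.length/3 + k))).take (nums.length - 2*(nums.length/3))) →
    s = highS (nums.length - 2*(nums.length/3)) (nums.drop (nums.length/3 + k)) →
    ((PySem.List.pyRange (((nums.length/3 + k : Nat) : Int) - 1) (((nums.length/3 : Nat) : Int) - 1) (-1)).foldl
        (stepA2 nums ps ((nums.length/3 : Nat) : Int)) (heap, s, a)).2.2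
      = List.foldl min a ((List.range k).map (fun t => gval nums (nums.length/3 + k - 1 - t))) := by
  have h3 : nums.length / 3 * 3 ≤ nums.length := Nat.div_mul_le_self nums.length 3
  set nn := nums.length / 3 with hnn
  set mm := nums.length - 2*nn with hmm
  induction k with
  | zero =>
    intro _ heap s a _ _
    rw [show (((nn + 0 : Nat) : Int) - 1) = ((nn : Nat) : Int) - 1 by push_cast; ring]
    rw [PySem.List.pyRange_neg_one_eq_nil (le_refl _)]
    simp
  | succ k ih =>
    intro hk heap s a hheap hs
    have hk' : k ≤ nn := by omega
    have hidx : nn + k < nums.length := by omega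
    have hcons : PySem.List.pyRange (((nn + (k+1) : Nat) : Int) - 1) (((nn : Nat) : Int) - 1) (-1)
        = ((nn + k : Nat) : Int) :: PySem.List.pyRange (((nn + k : Nat) : Int) - 1) (((nn : Nat) : Int) - 1) (-1) := by
      rw [show (((nn + (k+1) : Nat) : Int) - 1) = ((nn + k : Nat) : Int) by push_cast; ring]
      exact PySem.List.pyRange_neg_one_cons (by push_cast; omega)
    rw [hcons, List.foldl_cons]
    have hx : PySem.List.pyGetD nums ((nn + k : Nat) : Int) 0 = nums[nn + k] := by
      rw [PySem.List.pyGetD_natCast]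
      exact List.getD_eq_getElem nums 0 hidx
    have hdrop : nums.drop (nn + k) = nums[nn + k] :: nums.drop (nn + k + 1) :=
      List.drop_eq_getElem_cons hidx
    have hmle : mm ≤ (nums.drop (nn + k + 1)).length := by
      rw [List.length_drop]; omega
    have hstep := high_step (nums.drop (nn + k + 1)) (nums[nn + k]) mm hmle heap
      (by rw [show nn + k + 1 = nn + (k+1) by omega]; exact hheap)
    simp only [] at hstep
    obtain ⟨hs1, hs2⟩ := hstep
    rw [← hdrop] at hs1 hs2
    rw [show nn + k + 1 = nn + (k+1) by omega] at hs2
    simp only [stepA2, hx]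
    have hidxps : (((nn + k : Nat) : Int) - ((nn : Nat) : Int)) = ((k : Nat) : Int) := by push_cast; ring
    rw [hidxps, PySem.List.pyGetD_natCast]
    have happ := ih hk' (popMinA (heap ++ [nums[nn + k]])).2
      (s + nums[nn + k] - (popMinA (heap ++ [nums[nn + k]])).1)
      (min a (ps.getD k 0 - (s + nums[nn + k] - (popMinA (heap ++ [nums[nn + k]])).1)))
      hs1
      (by rw [hs2, hs])
    rw [happ]
    have ha' : ps.getD k 0 - (s + nums[nn + k] - (popMinA (heap ++ [nums[nn + k]])).1)
        = gval nums (nn + k) := by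
      rw [hps k hk', gval, ← hnn, ← hmm, hs2, hs]
    rw [ha']
    have hhead : gval nums (nn + (k+1) - 1 - 0) = gval nums (nn + k) := by
      rw [show nn + (k+1) - 1 - 0 = nn + k by omega]
    have htail : (List.range k).map ((fun t => gval nums (nn + (k+1) - 1 - t)) ∘ Nat.succ)
        = (List.range k).map (fun t => gval nums (nn + k - 1 - t)) := by
      apply List.map_congr_left
      intro t ht
      show gval nums (nn + (k+1) - 1 - (t+1)) = gval nums (nn + k - 1 - t)
      rw [show nn + (k+1) - 1 - (t+1) = nn + k - 1 - t by omega]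
    rw [List.range_succ_eq_map, List.map_cons, List.map_map, hhead, htail, List.foldl_cons]





theorem A_eq (nums : List Int) :
    minimumDifference2 nums
      = List.foldl min (gval nums (nums.length/3 + nums.length/3))
          ((List.range (nums.length/3)).map
            (fun t => gval nums (nums.length/3 + nums.length/3 - 1 - t))) := by
  have h3 : nums.length / 3 * 3 ≤ nums.length := Nat.div_mul_le_self nums.length 3
  set nn := nums.length / 3 with hnn
  set mm := nums.length - 2*nn with hmm
  have hfd : PySem.Int.floordiv ((nums.length : Int)) 3 = ((nn : Nat) : Int) := by
    rw [hnn, show (3:Int) = ((3:Nat):Int) from rfl]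
    exact PySem.Int.floordiv_natCast nums.length 3
  have hmul : 2 * ((nn : Nat) : Int) = ((nn : Nat) : Int) + ((nn : Nat) : Int) := two_mul _
  simp only [minimumDifference2, hfd, hmul]
  rw [PySem.List.slice_to_natCast]
  -- identify the first fold with loop1
  obtain ⟨hp1, hp2, hlen, htab⟩ := loop1 nums nn (le_refl _)
  rw [← hnn] at hp1 hp2 hlen htab
  -- name the prefix table
  set ps := ((PySem.List.pyRange ((nn : Nat) : Int) (((nn : Nat) : Int) + ((nn : Nat) : Int)) 1).foldl
      (stepA1 nums ((nn : Nat) : Int))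
      ((nums.take nn).map (fun x => -x),
       ((nums.take nn).map (fun x => -x)).sum * (-1),
       PySem.List.pySetD (List.replicate (nums.length + 1) (0:Int)) 0
         (((nums.take nn).map (fun x => -x)).sum * (-1)))).2.2 with hps
  -- the second slice is drop (nn+nn)
  rw [show ((nn : Nat) : Int) + ((nn : Nat) : Int) = ((nn + nn : Nat) : Int) by push_cast; ring,
      PySem.List.slice_natCast]
  rw [List.take_of_length_le (by rw [List.length_drop])]
  set D := nums.drop (nn + nn) with hD
  have hDlen : D.length = nums.length - (nn + nn) := by rw [hD, List.length_drop]
  have hsDfull : (sD D).take mm = sD D := by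
    apply List.take_of_length_le
    rw [(sD_perm D).length_eq, hDlen]
    omega
  have hhigh : highS mm D = D.sum := by
    rw [highS, hsDfull]
    exact (sD_perm D).sum_eq
  have hl2 := loop2 nums ps htab nn (le_refl _) D D.sum
      (PySem.List.pyGetD ps ((nn:Nat):Int) 0 - D.sum)
      (by rw [hsDfull]; exact (sD_perm D).symm)
      (by rw [hhigh])
  rw [hl2]
  have ha : PySem.List.pyGetD ps ((nn:Nat):Int) 0 - D.sum = gval nums (nn + nn) := by
    rw [PySem.List.pyGetD_natCast, htab nn (le_refl _), gval, ← hnn, ← hmm, ← hD, hhigh]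
  rw [ha]

theorem map_range_rev (n : Nat) (f : Nat → Int) :
    (List.range n).map (fun j => f (n - 1 - j)) = ((List.range n).map f).reverse := by
  apply List.ext_getElem
  · simp
  · intro i h1 h2
    simp [List.getElem_reverse]

theorem B_eq (nums : List Int) :
    minimumDifference2_alt nums
      = List.foldl min (gval nums (nums.length/3 + 0))
          ((List.range (nums.length/3)).map (fun k => gval nums (nums.length/3 + (k+1)))) := by
  have h3 : nums.length / 3 * 3 ≤ nums.length := Nat.div_mul_le_self nums.length 3
  set nn := nums.length / 3 with hnn
  set mm := nums.length - 2*nn with hmm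
  have hfd : PySem.Int.floordiv ((nums.length : Int)) 3 = ((nn : Nat) : Int) := by
    rw [hnn, show (3:Int) = ((3:Nat):Int) from rfl]
    exact PySem.Int.floordiv_natCast nums.length 3
  simp only [minimumDifference2_alt, hfd]
  rw [PySem.List.pyRange_one]
  rw [show ((2 * ((nn:Nat):Int) + 1) - ((nn:Nat):Int)).toNat = nn + 1 by omega]
  rw [List.map_map]
  have hc : ∀ k ∈ List.range (nn+1),
      ((fun i => (PySem.List.slice (PySem.List.sorted (PySem.List.slice nums none (some i)) (fun x => x) false) none (some ((nn:Nat):Int))).sum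
        - (PySem.List.slice (PySem.List.sorted (PySem.List.slice nums (some i) none) (fun x => x) true) none (some ((nums.length:Int) - 2*((nn:Nat):Int)))).sum)
        ∘ (fun k : Nat => ((nn:Nat):Int) + (k:Int))) k = gval nums (nn + k) := by
    intro k hk
    simp only [Function.comp_apply]
    rw [show ((nn:Nat):Int) + (k:Int) = ((nn + k : Nat):Int) by push_cast; ring]
    rw [PySem.List.slice_to_natCast, PySem.List.slice_from_natCast]
    rw [PySem.List.slice_to_natCast]
    rw [show ((nums.length:Int) - 2*((nn:Nat):Int)) = ((mm : Nat) : Int) by rw [hmm]; omega]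
    rw [PySem.List.slice_to_natCast]
    rw [gval, ← hnn, ← hmm]
    rfl
  rw [List.map_congr_left hc]
  rw [List.range_succ_eq_map, List.map_cons, List.map_map]
  rw [PySem.List.min?_id_cons, Option.getD_some]
  congr 1

theorem AB_eq (nums : List Int) : minimumDifference2 nums = minimumDifference2_alt nums := by
  rw [A_eq, B_eq]
  set nn := nums.length/3 with hnn
  have hmapA : (List.range nn).map (fun t => gval nums (nn + nn - 1 - t))
      = ((List.range nn).map (fun j => gval nums (nn + j))).reverse := by
    rw [← map_range_rev nn (fun j => gval nums (nn + j))]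
    apply List.map_congr_left
    intro t ht
    have htn : t < nn := List.mem_range.mp ht
    show gval nums (nn + nn - 1 - t) = gval nums (nn + (nn - 1 - t))
    congr 1
    omega
  apply foldl_min_eq_of_perm
  rw [hmapA]
  have hB : gval nums (nn+0) :: (List.range nn).map (fun k => gval nums (nn + (k+1)))
      = (List.range (nn+1)).map (fun j => gval nums (nn + j)) := by
    rw [List.range_succ_eq_map, List.map_cons, List.map_map]
    congr 1
  rw [hB]
  have h1 : ((gval nums (nn+nn)) :: ((List.range nn).map (fun j => gval nums (nn + j))).reverse).Perm
      (((List.range nn).map (fun j => gval nums (nn + j))).reverse ++ [gval nums (nn+nn)]) :=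
    (List.perm_append_singleton ..).symm
  refine h1.trans ?_
  have h2 : (((List.range nn).map (fun j => gval nums (nn + j))).reverse ++ [gval nums (nn+nn)]).Perm
      (((List.range nn).map (fun j => gval nums (nn + j))) ++ [gval nums (nn+nn)]) :=
    (List.reverse_perm _).append_right _
  refine h2.trans ?_
  rw [List.range_succ, List.map_append]
  rfl

-- ===== VERDICT (by name: the statement is the Claim_ definition above) =====
theorem minimumDifference2_spec : Claim_equal_minimumDifference2 := by
  intro nums _
  unfold Spec_minimumDifference2
  exact AB_eq nums
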